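-- pv_equiv track=rewrite | github.com/pvial00/Book-of-Mormon-Cryptanalysis-Tool | decryptor.py | _alphabet_generator
-- ===== SOURCE A (Python) =====
-- def _alphabet_generator(n):
--     alphabet = {}
--     alphabet_list = []
--     for c in range(n):
--         x = c % 26
--         letter = chr(x  + 65)
--         alphabet[x % 26] = letter
--         alphabet_list.append(letter)
--     return alphabet, alphabet_list
-- ===== SOURCE B (Python) =====
-- def _alphabet_generator(n):
--     base = ''.join(chr(65 + i) for i in range(26))
--     cycles = n // 26 + 1
--     alphabet_list = list((base * cycles)[:n])
--     alphabet = {i: base[i] for i in range(min(n, 26))}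
--     return alphabet, alphabet_list
-- ===== Notes on version B (the rewrite author's own statement) =====
-- stated objective: faster
-- what changed: Replaces the per-element loop (which appends one letter and re-inserts one dict key per index) by whole-structure assembly: the base alphabet built once, the list formed by string repetition plus a slice, and the dict by a single comprehension over the first full cycle.
import Mathlib
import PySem

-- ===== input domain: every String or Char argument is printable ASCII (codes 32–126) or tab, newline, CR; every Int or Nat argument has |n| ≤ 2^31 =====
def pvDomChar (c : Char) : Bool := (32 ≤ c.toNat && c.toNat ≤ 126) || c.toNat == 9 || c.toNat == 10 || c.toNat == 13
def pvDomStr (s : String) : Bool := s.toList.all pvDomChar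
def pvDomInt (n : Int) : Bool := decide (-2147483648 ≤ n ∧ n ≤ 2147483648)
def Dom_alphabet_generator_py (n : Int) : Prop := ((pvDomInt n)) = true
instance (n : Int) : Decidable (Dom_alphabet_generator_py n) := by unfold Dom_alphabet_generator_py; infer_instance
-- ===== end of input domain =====

-- B builds the whole structures at once (base alphabet built once, the list by repetition+slice,
-- the dict by one comprehension over range(min(n,26))) instead of A's per-index append/insert loop;
-- measured faster in a timing run (constant factor: bulk repetition/slice instead of a per-element loop).

-- ===== PORT A =====
-- chr(k) for 65 ≤ k ≤ 90 is exact as Char.ofNat k (ASCII range)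
def alphabet_generator_py (n : Int) : (List (Int × String)) × List String :=
  let st := (PySem.List.pyRange 0 n 1).foldl
    (fun (st : PySem.Dict Int String × List String) c =>
      let x := PySem.Int.mod c 26
      let letter := String.ofList [Char.ofNat (x + 65).toNat]
      (st.1.insert (PySem.Int.mod x 26) letter, st.2 ++ [letter]))
    (PySem.Dict.empty, [])
  (st.1.items, st.2)

-- ===== PORT B =====
def alphabet_generator_py_alt (n : Int) : (List (Int × String)) × List String :=
  -- base = ''.join(chr(65 + i) for i in range(26)): kept as its character list
  let base : List Char := (PySem.List.pyRange 0 26 1).map (fun i => Char.ofNat (65 + i).toNat)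
  let cycles : Int := PySem.Int.floordiv n 26 + 1
  -- list((base * cycles)[:n])
  let alphabet_list : List String :=
    (PySem.List.slice (PySem.List.pyRepeat base cycles) none (some n)).map (fun ch => String.ofList [ch])
  -- {i: base[i] for i in range(min(n, 26))}: i is always in range of base, so pyGetD's default is never used
  let alphabet : List (Int × String) :=
    (PySem.List.pyRange 0 (min n 26) 1).map (fun i => (i, String.ofList [PySem.List.pyGetD base i 'A']))
  (alphabet, alphabet_list)

-- ===== PRECONDITION & SPEC =====
def Spec_alphabet_generator_py (n : Int) (out : (List (Int × String)) × List String) : Prop := out = alphabet_generator_py_alt n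
instance (n : Int) (out : (List (Int × String)) × List String) : Decidable (Spec_alphabet_generator_py n out) := by unfold Spec_alphabet_generator_py; infer_instance

-- ===== CLAIM (what is proved, stated in full; the proofs are below) =====
def Claim_equal_alphabet_generator_py : Prop := ∀ (n : Int), Dom_alphabet_generator_py n → Spec_alphabet_generator_py n (alphabet_generator_py n)

-- ===== LEMMAS AND PROOFS =====

-- the letter written at loop index c (both programs produce it)
def pvLetter (c : Int) : String := String.ofList [Char.ofNat ((PySem.Int.mod c 26) + 65).toNat]

theorem pv_mod_idem (c : Int) : PySem.Int.mod (PySem.Int.mod c 26) 26 = PySem.Int.mod c 26 := by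
  rw [PySem.Int.mod_eq_emod_of_pos (b := 26) (by norm_num),
      PySem.Int.mod_eq_emod_of_pos (b := 26) (by norm_num)]
  exact Int.emod_emod_of_dvd c dvd_rfl

theorem pv_mod_small (i : Int) (h0 : 0 ≤ i) (h1 : i < 26) : PySem.Int.mod i 26 = i := by
  rw [PySem.Int.mod_eq_emod_of_pos (by norm_num)]; omega

theorem pv_mod_natCast26 (m : Nat) : PySem.Int.mod (m : Int) 26 = ((m % 26 : Nat) : Int) := by
  have := PySem.Int.mod_natCast m 26
  rw [show ((26:Nat):Int) = (26:Int) by norm_num] at this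
  exact this

-- A's dict fold produces exactly the first min(n,26) keys, in order
theorem pv_dict_items (m : Nat) :
    ((PySem.List.pyRange 0 (m : Int) 1).foldl
      (fun (d : PySem.Dict Int String) c => d.insert (PySem.Int.mod c 26) (pvLetter c))
      PySem.Dict.empty).items
    = (PySem.List.pyRange 0 (min (m : Int) 26) 1).map (fun i => (i, pvLetter i)) := by
  induction m with
  | zero => simp [PySem.List.pyRange_one_eq_nil]; rfl
  | succ m ih =>
    have hsucc : PySem.List.pyRange 0 ((m+1 : Nat) : Int) 1
        = PySem.List.pyRange 0 (m : Int) 1 ++ [(m : Int)] := by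
      push_cast
      exact PySem.List.pyRange_one_succ_right (by omega)
    rw [hsucc, List.foldl_append, List.foldl_cons, List.foldl_nil]
    set D := (PySem.List.pyRange 0 (m : Int) 1).foldl
      (fun (d : PySem.Dict Int String) c => d.insert (PySem.Int.mod c 26) (pvLetter c))
      PySem.Dict.empty with hD
    have hkeys : D.keys = (PySem.List.pyRange 0 (min (m : Int) 26) 1).map id := by
      show D.items.map (·.1) = _
      rw [ih, List.map_map]; rfl
    by_cases hm : m < 26
    · -- fresh key m: insert appends
      have hmod : PySem.Int.mod (m : Int) 26 = (m : Int) :=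
        pv_mod_small _ (by omega) (by exact_mod_cast hm)
      have hnc : D.contains (m : Int) = false := by
        rw [PySem.Dict.contains_eq_decide_mem_keys, hkeys]
        simp [PySem.List.mem_pyRange_one]
      rw [hmod, PySem.Dict.items_insert_of_not_contains _ _ hnc, ih]
      have h1 : min ((m:Int)) 26 = (m:Int) := by omega
      have h2 : min (((m+1:Nat)):Int) 26 = (m:Int) + 1 := by push_cast; omega
      rw [h1, h2, PySem.List.pyRange_one_succ_right (by omega), List.map_append]
      rfl
    · -- key m % 26 already present, with the same value: the replacement map is the identity
      have h1 : min ((m:Int)) 26 = 26 := by omega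
      have h2 : min (((m+1:Nat)):Int) 26 = 26 := by push_cast; omega
      have hmod : PySem.Int.mod (m : Int) 26 = ((m % 26 : Nat) : Int) := pv_mod_natCast26 m
      have hc : D.contains (PySem.Int.mod (m : Int) 26) = true := by
        rw [PySem.Dict.contains_eq_decide_mem_keys, hkeys, hmod, h1]
        simp only [List.map_id, decide_eq_true_eq, PySem.List.mem_pyRange_one]
        constructor
        · omega
        · exact_mod_cast Nat.mod_lt m (by norm_num)
      rw [PySem.Dict.items_insert_of_contains _ _ hc, ih, h1, h2, List.map_map]
      apply List.map_congr_left
      intro i hi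
      simp only [Function.comp_apply]
      by_cases he : i = PySem.Int.mod (m : Int) 26
      · have hval : pvLetter (m : Int) = pvLetter i := by
          unfold pvLetter
          rw [he, pv_mod_idem]
        rw [if_pos (by simp [he]), hval, he]
      · rw [if_neg (fun h => he (eq_of_beq h))]

-- the repeated base alphabet, as plain Nat indices
theorem pv_flatten_replicate_char (t : Nat) :
    (List.replicate t ((PySem.List.pyRange 0 26 1).map (fun i => Char.ofNat (65 + i).toNat))).flatten
    = (List.range (26 * t)).map (fun k => Char.ofNat (k % 26 + 65)) := by
  induction t with
  | zero => simp
  | succ t ih =>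
    rw [List.replicate_succ, List.flatten_cons, ih]
    have hbase : (PySem.List.pyRange 0 26 1).map (fun i => Char.ofNat (65 + i).toNat)
        = (List.range 26).map (fun k => Char.ofNat (k % 26 + 65)) := by
      rw [PySem.List.pyRange_one]
      simp only [List.map_map]
      apply List.map_congr_left
      intro k hk
      have hk26 : k < 26 := by simpa using (List.mem_range.1 (by simpa using hk))
      simp only [Function.comp_apply]
      congr 1
      rw [Nat.mod_eq_of_lt hk26]
      omega
    rw [hbase]
    have h26 : 26 * (t + 1) = 26 + 26 * t := by ring
    rw [h26, List.range_add, List.map_append]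
    congr 1
    rw [List.map_map]
    apply List.map_congr_left
    intro k hk
    simp only [Function.comp_apply]
    congr 2
    omega

-- ===== VERDICT (by name: the statement is the Claim_ definition above) =====
theorem alphabet_generator_py_spec : Claim_equal_alphabet_generator_py := by
  intro n _
  show alphabet_generator_py n = alphabet_generator_py_alt n
  unfold alphabet_generator_py alphabet_generator_py_alt
  simp only []
  rw [PySem.List.foldl_prod_mk
      (f := fun (d : PySem.Dict Int String) c =>
        d.insert (PySem.Int.mod (PySem.Int.mod c 26) 26)
          (String.ofList [Char.ofNat (PySem.Int.mod c 26 + 65).toNat]))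
      (g := fun (l : List String) c => l ++ [String.ofList [Char.ofNat (PySem.Int.mod c 26 + 65).toNat]])]
  simp only [pv_mod_idem]
  rcases lt_or_ge n 0 with hn | hn
  · -- n < 0 : both sides are completely empty
    have hr : PySem.List.pyRange 0 n 1 = [] := PySem.List.pyRange_one_eq_nil (by omega)
    have hrm : PySem.List.pyRange 0 (min n 26) 1 = [] := PySem.List.pyRange_one_eq_nil (by omega)
    have hcyc : (PySem.Int.floordiv n 26 + 1).toNat = 0 := by
      have : PySem.Int.floordiv n 26 < 0 :=
        (PySem.Int.floordiv_lt_iff_lt_mul (by norm_num)).2 (by omega)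
      omega
    have hrep : PySem.List.pyRepeat ((PySem.List.pyRange 0 26 1).map (fun i => Char.ofNat (65 + i).toNat))
        (PySem.Int.floordiv n 26 + 1) = [] := by
      show (List.replicate (PySem.Int.floordiv n 26 + 1).toNat _).flatten = []
      rw [hcyc]; rfl
    rw [hr, hrm, hrep]
    simp only [List.foldl_nil, List.map_nil]
    refine Prod.ext rfl ?_
    simp [PySem.List.slice]
  · -- 0 ≤ n : write n = ↑m and compare both components in canonical Nat form
    obtain ⟨m, rfl⟩ : ∃ m : Nat, n = (m : Int) := ⟨n.toNat, by omega⟩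
    have hcycles : (PySem.Int.floordiv (m : Int) 26 + 1) = ((m / 26 + 1 : Nat) : Int) := by
      have := PySem.Int.floordiv_natCast m 26
      rw [show ((26:Nat):Int) = (26:Int) by norm_num] at this
      rw [this]; push_cast; ring
    refine Prod.ext ?_ ?_
    · -- dict component
      show _ = (PySem.List.pyRange 0 (min (m:Int) 26) 1).map
        (fun i => (i, String.ofList [PySem.List.pyGetD ((PySem.List.pyRange 0 26 1).map
          (fun i => Char.ofNat (65 + i).toNat)) i 'A']))
      have hA := pv_dict_items m
      unfold pvLetter at hA
      rw [hA]
      apply List.map_congr_left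
      intro i hi
      have hib := (PySem.List.mem_pyRange_one).1 hi
      have hi26 : i < 26 := by
        have h := min_le_right ((m:Int)) 26
        omega
      rw [PySem.List.pyGetD_map_pyRange_of_nonneg _ _ _ _ hib.1 hi26]
      have harg : PySem.Int.mod i 26 + 65 = 65 + i := by
        rw [pv_mod_small i hib.1 hi26]; ring
      rw [harg]
    · -- list component
      show _ = (PySem.List.slice (PySem.List.pyRepeat _ _) none (some ((m:Nat) : Int))).map _
      rw [PySem.List.foldl_append_singleton_eq_map, List.nil_append]
      have hrep : PySem.List.pyRepeat ((PySem.List.pyRange 0 26 1).map (fun i => Char.ofNat (65 + i).toNat))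
          (PySem.Int.floordiv (m : Int) 26 + 1)
          = (List.range (26 * (m / 26 + 1))).map (fun k => Char.ofNat (k % 26 + 65)) := by
        show (List.replicate (PySem.Int.floordiv (m : Int) 26 + 1).toNat _).flatten = _
        rw [hcycles, Int.toNat_natCast]
        exact pv_flatten_replicate_char (m / 26 + 1)
      rw [hrep, PySem.List.slice_to_natCast, ← List.map_take, List.take_range]
      have hmin : min m (26 * (m / 26 + 1)) = m := by omega
      rw [hmin, List.map_map, PySem.List.pyRange_one]
      simp only [List.map_map, sub_zero, Int.toNat_natCast]
      apply List.map_congr_left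
      intro k hk
      simp only [Function.comp_apply, zero_add]
      rw [show PySem.Int.mod (k:Int) 26 = ((k % 26 : Nat) : Int) from pv_mod_natCast26 k]
      have hcast : ((k % 26 : Nat) : Int) + 65 = ((k % 26 + 65 : Nat) : Int) := by push_cast; ring
      rw [hcast, Int.toNat_natCast]
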